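-- pv_equiv track=rewrite | github.com/wjdqhnam/Eclipso | server/modules/xlsx_module.py | _xlsx_cell_ref_to_rc
-- ===== SOURCE A (Python) =====
-- from typing import List, Tuple, Optional
--
-- def _xlsx_col_to_index(col: str) -> int:
--     # A -> 0, B -> 1, Z -> 25, AA -> 26 ...
--     n = 0
--     for ch in col.upper():
--         if not ("A" <= ch <= "Z"):
--             continue
--         n = n * 26 + (ord(ch) - ord("A") + 1)
--     return max(0, n - 1)
--
-- def _xlsx_cell_ref_to_rc(ref: str) -> Tuple[int, int]:
--     # "C5" -> (row_idx=4, col_idx=2)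
--     s = (ref or "").strip()
--     if not s:
--         return (0, 0)
--     col = []
--     row = []
--     for ch in s:
--         if ch.isalpha():
--             col.append(ch)
--         elif ch.isdigit():
--             row.append(ch)
--     r = int("".join(row)) - 1 if row else 0
--     c = _xlsx_col_to_index("".join(col)) if col else 0
--     return (max(0, r), max(0, c))
-- ===== SOURCE B (Python) =====
-- def _xlsx_cell_ref_to_rc(ref):
--     # Single fused pass: numeric accumulators instead of collecting char lists.
--     s = (ref or "").strip()
--     n = r = 0
--     has_col = has_row = False
--     for ch in s:
--         if ch.isalpha():
--             n = n * 26 + (ord(ch.upper()) - 64)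
--             has_col = True
--         elif ch.isdigit():
--             r = r * 10 + (ord(ch) - 48)
--             has_row = True
--     return (max(0, r - 1) if has_row else 0,
--             max(0, n - 1) if has_col else 0)
-- ===== Notes on version B (the rewrite author's own statement) =====
-- stated objective: simpler
-- what changed: Replaces A's two-phase design (collect alpha/digit chars into lists, then int() on the joined digits and a separate helper loop over the upper-cased letters) with one fused pass over the stripped string keeping two integer accumulators and two seen-flags, with no empty-string early return.
import Mathlib
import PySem

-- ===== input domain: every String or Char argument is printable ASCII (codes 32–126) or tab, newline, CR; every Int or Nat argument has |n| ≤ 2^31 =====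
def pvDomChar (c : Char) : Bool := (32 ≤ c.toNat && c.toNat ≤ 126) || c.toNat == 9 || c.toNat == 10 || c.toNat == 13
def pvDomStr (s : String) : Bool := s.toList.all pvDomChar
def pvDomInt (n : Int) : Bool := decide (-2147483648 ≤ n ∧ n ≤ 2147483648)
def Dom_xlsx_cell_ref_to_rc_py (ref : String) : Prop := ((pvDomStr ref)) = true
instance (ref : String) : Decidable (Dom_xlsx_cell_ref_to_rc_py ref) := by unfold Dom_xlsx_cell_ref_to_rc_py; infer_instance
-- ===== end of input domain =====

-- B replaces A's two-phase collect-then-parse (char lists joined, int(), a second helper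
-- loop over the upper-cased column letters) by one fused pass keeping integer accumulators
-- and two flags; objective: simpler (no speed claim).

-- ===== PORT A =====
-- int("".join(row)) is ported by hand as the decimal-value fold pvDecVal: row is by
-- construction a (nonempty, when used) list of chars '0'..'9' collected under isdigit,
-- and on such strings int() returns exactly this value (exact on the ASCII domain).
def pvDecVal (ds : List Char) : Int :=
  ds.foldl (fun r c => r * 10 + ((c.toNat : Int) - 48)) 0

def xlsx_col_to_index_py (col : List Char) : Int :=
  -- A -> 0, B -> 1, Z -> 25, AA -> 26 ...
  let n : Int := (PySem.Chars.upper col).foldl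
    (fun n ch => if ¬('A' ≤ ch ∧ ch ≤ 'Z') then n
                 else n * 26 + ((ch.toNat : Int) - 65 + 1)) 0
  max 0 (n - 1)

def xlsx_cell_ref_to_rc_py (ref : String) : Int × Int :=
  let s := PySem.Chars.strip ref.toList
  if s = [] then (0, 0)
  else
    let cr := s.foldl (fun (acc : List Char × List Char) ch =>
        if PySem.Chars.isalpha ch then (acc.1 ++ [ch], acc.2)
        else if PySem.Chars.isdigit ch then (acc.1, acc.2 ++ [ch])
        else acc) ([], [])
    let r : Int := if cr.2 ≠ [] then pvDecVal cr.2 - 1 else 0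
    let c : Int := if cr.1 ≠ [] then xlsx_col_to_index_py cr.1 else 0
    (max 0 r, max 0 c)

-- ===== PORT B =====
def xlsx_cell_ref_to_rc_py_alt (ref : String) : Int × Int :=
  let st := (PySem.Chars.strip ref.toList).foldl
    (fun (st : Int × Int × Bool × Bool) ch =>
      if PySem.Chars.isalpha ch then
        (st.1 * 26 + (((PySem.Chars.upperChar ch).toNat : Int) - 64), st.2.1, true, st.2.2.2)
      else if PySem.Chars.isdigit ch then
        (st.1, st.2.1 * 10 + ((ch.toNat : Int) - 48), st.2.2.1, true)
      else st) (0, 0, false, false)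
  (if st.2.2.2 then max 0 (st.2.1 - 1) else 0,
   if st.2.2.1 then max 0 (st.1 - 1) else 0)

-- ===== PRECONDITION & SPEC =====
def Spec_xlsx_cell_ref_to_rc_py (ref : String) (out : Int × Int) : Prop := out = xlsx_cell_ref_to_rc_py_alt ref
instance (ref : String) (out : Int × Int) : Decidable (Spec_xlsx_cell_ref_to_rc_py ref out) := by unfold Spec_xlsx_cell_ref_to_rc_py; infer_instance

-- ===== CLAIM (what is proved, stated in full; the proofs are below) =====
def Claim_equal_xlsx_cell_ref_to_rc_py : Prop := ∀ (ref : String), Dom_xlsx_cell_ref_to_rc_py ref → Spec_xlsx_cell_ref_to_rc_py ref (xlsx_cell_ref_to_rc_py ref)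

-- ===== LEMMAS AND PROOFS =====

lemma pv_alpha_not_digit (c : Char) (h : PySem.Chars.isalpha c = true) :
    PySem.Chars.isdigit c = false := by
  simp [PySem.Chars.isalpha, PySem.Chars.islower, PySem.Chars.isupper, Char.le_def,
        UInt32.le_iff_toNat_le] at h
  simp [PySem.Chars.isdigit, Char.le_def, UInt32.le_iff_toNat_le]
  omega

lemma pv_upper_alpha (c : Char) (h : PySem.Chars.isalpha c = true) :
    'A' ≤ PySem.Chars.upperChar c ∧ PySem.Chars.upperChar c ≤ 'Z' := by
  simp [PySem.Chars.isalpha, PySem.Chars.islower, PySem.Chars.isupper, Char.le_def,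
        UInt32.le_iff_toNat_le] at h
  unfold PySem.Chars.upperChar
  split_ifs with hl
  · simp [PySem.Chars.islower, Char.le_def, UInt32.le_iff_toNat_le] at hl
    have hv : (c.toNat - 32).isValidChar := by
      constructor; omega
    constructor <;>
      simp [Char.le_def, UInt32.le_iff_toNat_le, Char.ofNat, hv, Char.ofNatAux] <;> omega
  · simp [PySem.Chars.islower, Char.le_def, UInt32.le_iff_toNat_le] at hl
    constructor <;> simp [Char.le_def, UInt32.le_iff_toNat_le] <;> omega

-- A's collecting loop splits the stripped string into its alpha and digit sublists.
lemma pv_loopA (cs : List Char) (c0 r0 : List Char) :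
    cs.foldl (fun (acc : List Char × List Char) ch =>
        if PySem.Chars.isalpha ch then (acc.1 ++ [ch], acc.2)
        else if PySem.Chars.isdigit ch then (acc.1, acc.2 ++ [ch])
        else acc) (c0, r0)
      = (c0 ++ cs.filter PySem.Chars.isalpha, r0 ++ cs.filter PySem.Chars.isdigit) := by
  induction cs generalizing c0 r0 with
  | nil => simp
  | cons c t ih =>
    by_cases ha : PySem.Chars.isalpha c = true
    · simp [ha, pv_alpha_not_digit c ha, ih]
    · by_cases hd : PySem.Chars.isdigit c = true
      · simp [ha, hd, ih]
      · simp [ha, hd, ih]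

-- B's fused loop is A's two filtered folds plus the two "seen anything" flags.
lemma pv_loopB (cs : List Char) (n r : Int) (hc hr : Bool) :
    cs.foldl (fun (st : Int × Int × Bool × Bool) ch =>
      if PySem.Chars.isalpha ch then
        (st.1 * 26 + (((PySem.Chars.upperChar ch).toNat : Int) - 64), st.2.1, true, st.2.2.2)
      else if PySem.Chars.isdigit ch then
        (st.1, st.2.1 * 10 + ((ch.toNat : Int) - 48), st.2.2.1, true)
      else st) (n, r, hc, hr)
    = ((cs.filter PySem.Chars.isalpha).foldl
         (fun n ch => n * 26 + (((PySem.Chars.upperChar ch).toNat : Int) - 64)) n,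
       (cs.filter PySem.Chars.isdigit).foldl
         (fun r ch => r * 10 + ((ch.toNat : Int) - 48)) r,
       hc || cs.any PySem.Chars.isalpha, hr || cs.any PySem.Chars.isdigit) := by
  induction cs generalizing n r hc hr with
  | nil => simp
  | cons c t ih =>
    by_cases ha : PySem.Chars.isalpha c = true
    · simp [ha, pv_alpha_not_digit c ha, ih]
    · by_cases hd : PySem.Chars.isdigit c = true
      · simp [ha, hd, ih]
      · simp [ha, hd, ih]

-- A's column helper on an all-alpha list computes B's unguarded fold.
lemma pv_col_fold (col : List Char) (hcol : ∀ c ∈ col, PySem.Chars.isalpha c = true) (n : Int) :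
    (PySem.Chars.upper col).foldl
      (fun n ch => if ¬('A' ≤ ch ∧ ch ≤ 'Z') then n
                   else n * 26 + ((ch.toNat : Int) - 65 + 1)) n
    = col.foldl (fun n ch => n * 26 + (((PySem.Chars.upperChar ch).toNat : Int) - 64)) n := by
  unfold PySem.Chars.upper
  rw [List.foldl_map]
  refine PySem.List.foldl_congr_mem _ _ _ _ (fun acc x hx => ?_)
  have h := pv_upper_alpha x (hcol x hx)
  simp [h.1, h.2]
  ring

-- ===== VERDICT (by name: the statement is the Claim_ definition above) =====
lemma pv_filter_ne {p : Char → Bool} (l : List Char) :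
    (l.filter p ≠ []) ↔ l.any p = true := by
  rw [Ne, List.filter_eq_nil_iff]
  simp [List.any_eq_true]

theorem xlsx_cell_ref_to_rc_py_spec : Claim_equal_xlsx_cell_ref_to_rc_py := by
  intro ref _
  unfold Spec_xlsx_cell_ref_to_rc_py xlsx_cell_ref_to_rc_py xlsx_cell_ref_to_rc_py_alt
  set s := PySem.Chars.strip ref.toList with hs
  simp only [pv_loopB, pv_loopA]
  by_cases hnil : s = []
  · simp [hnil]
  · simp only [hnil, if_false, List.nil_append]
    have hcol : ∀ c ∈ s.filter PySem.Chars.isalpha, PySem.Chars.isalpha c = true := by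
      intro c hc; exact (List.mem_filter.mp hc).2
    refine Prod.ext ?_ ?_
    · by_cases hD : s.any PySem.Chars.isdigit = true
      · simp [hD, (pv_filter_ne s).mpr hD, pvDecVal]
      · have : s.filter PySem.Chars.isdigit = [] := by
          by_contra h; exact hD ((pv_filter_ne s).mp h)
        simp [hD, this]
    · by_cases hA : s.any PySem.Chars.isalpha = true
      · have hne : s.filter PySem.Chars.isalpha ≠ [] := (pv_filter_ne s).mpr hA
        simp only [hA, if_pos hne]
        rw [xlsx_col_to_index_py, pv_col_fold _ hcol]
        simp only [Bool.false_or, if_true]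
        omega
      · have : s.filter PySem.Chars.isalpha = [] := by
          by_contra h; exact hA ((pv_filter_ne s).mp h)
        simp [hA, this]
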